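-- pv_equiv track=rewrite | github.com/Rysin/HackerRankScripts | company/Practice.py | find_depth_of_each_group
-- ===== SOURCE A (Python) =====
-- def find_depth_of_each_group(string):
--     group_list = string.split()
--
--     depth_counts = []
--     for each in group_list:
--         _chars = list(each)
--         depth = 0
--         for i in range(len(_chars) - 1):
--             if _chars[i] == _chars[i + 1]:
--                 depth += 1
--             else:
--                 break
--         depth_counts.append(depth + 1)
--
--     return depth_counts
-- ===== SOURCE B (Python) =====
-- def find_depth_of_each_group(string):
--     # Leading identical-char run per whitespace token, measured by stripping
--     # the run with str.lstrip instead of comparing adjacent chars in a loop.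
--     return [len(w) - len(w.lstrip(w[0])) for w in string.split()]
-- ===== Notes on version B (the rewrite author's own statement) =====
-- stated objective: idiomatic
-- what changed: Replaces the index loop comparing adjacent characters with an early break by a loop-free comprehension that measures the leading run as len(w) - len(w.lstrip(w[0])).
import Mathlib
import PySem

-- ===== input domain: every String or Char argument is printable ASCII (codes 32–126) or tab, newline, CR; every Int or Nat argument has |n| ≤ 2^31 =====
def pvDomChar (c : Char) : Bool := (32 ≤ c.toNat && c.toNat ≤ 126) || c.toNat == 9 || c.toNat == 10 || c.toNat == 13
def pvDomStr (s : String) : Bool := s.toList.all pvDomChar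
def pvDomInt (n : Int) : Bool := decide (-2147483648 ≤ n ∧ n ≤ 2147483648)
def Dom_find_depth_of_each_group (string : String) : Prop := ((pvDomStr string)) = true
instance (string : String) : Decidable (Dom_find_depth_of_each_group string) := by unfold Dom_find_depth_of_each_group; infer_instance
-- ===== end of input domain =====

-- B replaces A's adjacent-character index loop (with early break) by stripping the
-- leading run with lstrip and subtracting lengths; objective: idiomatic, same cost.


-- ===== PORT A =====
-- the inner 'for i in range(len(_chars) - 1): if _chars[i] == _chars[i+1]: depth += 1 else: break'
-- as structural recursion over the same adjacent pairs, stopping at the first mismatch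
def pvDepthLoop : List Char → Int
  | a :: b :: rest => if a = b then 1 + pvDepthLoop (b :: rest) else 0
  | _ => 0

def find_depth_of_each_group (string : String) : List Int :=
  let group_list := PySem.Str.split₀ string
  group_list.foldl (fun depth_counts each => depth_counts ++ [pvDepthLoop each.toList + 1]) []

-- ===== PORT B =====
-- len(w) - len(w.lstrip(w[0])): lstrip with a single-char set drops exactly the leading
-- run of that char, so it is dropWhile (== first char); the [] case is unreachable
-- (split() yields no empty token) and returns 0 as w[0] has no value to strip with.
def pvRunLen (cs : List Char) : Int :=
  match cs with
  | [] => 0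
  | c :: _ => (cs.length : Int) - ((cs.dropWhile (fun x => x == c)).length : Int)

def find_depth_of_each_group_alt (string : String) : List Int :=
  (PySem.Str.split₀ string).map (fun w => pvRunLen w.toList)

-- ===== PRECONDITION & SPEC =====
def Spec_find_depth_of_each_group (string : String) (out : List Int) : Prop := out = find_depth_of_each_group_alt string
instance (string : String) (out : List Int) : Decidable (Spec_find_depth_of_each_group string out) := by unfold Spec_find_depth_of_each_group; infer_instance

-- ===== CLAIM (what is proved, stated in full; the proofs are below) =====
def Claim_equal_find_depth_of_each_group : Prop := ∀ (string : String), Dom_find_depth_of_each_group string → Spec_find_depth_of_each_group string (find_depth_of_each_group string)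

-- ===== LEMMAS AND PROOFS =====

-- the append-accumulator loop of A is a map
theorem pv_foldl_append_map {α β : Type} (f : α → β) (l : List α) (acc : List β) :
    l.foldl (fun a e => a ++ [f e]) acc = acc ++ l.map f := by
  induction l generalizing acc with
  | nil => simp
  | cons x xs ih => simp [List.foldl, ih]

-- on a nonempty token the two per-token computations agree
theorem pv_depth_eq_runLen (c : Char) (rest : List Char) :
    pvDepthLoop (c :: rest) + 1 = pvRunLen (c :: rest) := by
  induction rest generalizing c with
  | nil => simp [pvDepthLoop, pvRunLen]
  | cons d t ih =>
    by_cases h : c = d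
    · subst h
      have := ih c
      simp [pvDepthLoop, pvRunLen] at this ⊢
      omega
    · simp [pvDepthLoop, pvRunLen, h, beq_eq_false_iff_ne.mpr (Ne.symm h)]

-- every token produced by split() is nonempty
theorem pv_split₀_go_ne_nil (s cur : List Char) (acc : List (List Char))
    (hacc : ∀ w ∈ acc, w ≠ []) :
    ∀ w ∈ PySem.Chars.split₀.go s cur acc, w ≠ [] := by
  induction s generalizing cur acc with
  | nil =>
    intro w hw
    unfold PySem.Chars.split₀.go at hw
    split at hw
    · exact hacc w (by simpa using hw)
    · rcases List.mem_cons.mp (List.mem_reverse.mp hw) with h | h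
      · subst h
        rename_i hne
        simp [List.isEmpty_iff] at hne
        simpa using hne
      · exact hacc w h
  | cons c rest ih =>
    intro w hw
    unfold PySem.Chars.split₀.go at hw
    split at hw
    · split at hw
      · exact ih [] acc hacc w hw
      · refine ih [] _ ?_ w hw
        intro v hv
        rcases List.mem_cons.mp hv with h | h
        · subst h
          rename_i hne
          simp [List.isEmpty_iff] at hne
          simpa using hne
        · exact hacc v h
    · exact ih (c :: cur) acc hacc w hw

theorem pv_token_ne_nil (s : String) (w : String) (hw : w ∈ PySem.Str.split₀ s) :
    w.toList ≠ [] := by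
  have h : w.toList ∈ PySem.Chars.split₀ s.toList := by
    have := PySem.Str.split₀_map_toList s
    rw [← this]
    exact List.mem_map_of_mem hw
  exact pv_split₀_go_ne_nil s.toList [] [] (by simp) _ h

-- ===== VERDICT (by name: the statement is the Claim_ definition above) =====
theorem find_depth_of_each_group_spec : Claim_equal_find_depth_of_each_group := by
  intro s _
  unfold Spec_find_depth_of_each_group find_depth_of_each_group find_depth_of_each_group_alt
  rw [pv_foldl_append_map]
  simp only [List.nil_append]
  apply List.map_congr_left
  intro w hw
  obtain ⟨c, rest, h⟩ := List.exists_cons_of_ne_nil (pv_token_ne_nil s w hw)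
  rw [h]
  exact pv_depth_eq_runLen c rest
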